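-- pv_equiv track=rewrite | github.com/kulkarniadithya/CCCE | code/model/construct_clause_dataset.py | get_formatted_index
-- ===== SOURCE A (Python) =====
-- def get_formatted_index(emotion_index):
--     final_indexes = []
--     if len(emotion_index) > 1:
--         for i in range(0, len(emotion_index)):
--             if i == 0:
--                 diff = emotion_index[i + 1] - emotion_index[i]
--                 if diff < 2:
--                     final_indexes.append(emotion_index[i])
--             elif (i > 0) and (i < len(emotion_index) - 1):
--                 diff1 = emotion_index[i + 1] - emotion_index[i]
--                 diff2 = emotion_index[i] - emotion_index[i - 1]
--                 if diff1 < 2 and diff2 < 2: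
--                     final_indexes.append(emotion_index[i])
--                 elif diff2 < 2:
--                     final_indexes.append(emotion_index[i])
--             else:
--                 diff2 = emotion_index[i] - emotion_index[i - 1]
--                 if diff2 < 2:
--                     final_indexes.append(emotion_index[i])
--         return final_indexes
--     else:
--         return emotion_index
-- ===== SOURCE B (Python) =====
-- def get_formatted_index(emotion_index):
--     if len(emotion_index) <= 1:
--         return emotion_index
--     # Segment the list into maximal runs of consecutive elements with gap < 2,
--     # then drop each run's leading element except when the very first run is longer than 1.
--     runs = []
--     cur = [emotion_index[0]]
--     for x in emotion_index[1:]: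
--         if x - cur[-1] < 2:
--             cur.append(x)
--         else:
--             runs.append(cur)
--             cur = [x]
--     runs.append(cur)
--     out = list(runs[0]) if len(runs[0]) > 1 else []
--     for run in runs[1:]:
--         out.extend(run[1:])
--     return out
-- ===== Notes on version B (the rewrite author's own statement) =====
-- stated objective: alternative
-- what changed: Replaces A's per-index loop with positional branch cases by a run-segmentation algorithm: the list is grouped into maximal runs of gap<2 neighbours, then the output is the first run (kept whole only if longer than 1) followed by each later run with its leading element dropped.
import Mathlib
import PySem

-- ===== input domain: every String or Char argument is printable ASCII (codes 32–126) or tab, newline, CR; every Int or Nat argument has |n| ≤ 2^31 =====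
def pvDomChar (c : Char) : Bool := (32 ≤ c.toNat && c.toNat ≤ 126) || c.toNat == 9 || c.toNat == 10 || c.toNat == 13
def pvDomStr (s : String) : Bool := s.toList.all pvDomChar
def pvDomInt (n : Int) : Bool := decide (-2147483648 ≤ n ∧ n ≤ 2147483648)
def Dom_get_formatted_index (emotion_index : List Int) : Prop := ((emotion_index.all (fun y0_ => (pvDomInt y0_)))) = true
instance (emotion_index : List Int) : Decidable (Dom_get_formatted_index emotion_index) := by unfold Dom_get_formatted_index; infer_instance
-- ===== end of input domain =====

-- B replaces A's positional-branch index loop by run segmentation (maximal gap<2 runs,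
-- then drop each later run's head and drop a length-1 first run); objective: alternative.

-- ===== PORT A =====
def get_formatted_index (emotion_index : List Int) : List Int :=
  if emotion_index.length > 1 then
    (PySem.List.pyRange 0 (emotion_index.length : Int) 1).foldl (fun final_indexes i =>
      if i == 0 then
        let diff := PySem.List.pyGetD emotion_index (i + 1) 0 - PySem.List.pyGetD emotion_index i 0
        if diff < 2 then final_indexes ++ [PySem.List.pyGetD emotion_index i 0] else final_indexes
      else if decide (i > 0) && decide (i < (emotion_index.length : Int) - 1) then
        let diff1 := PySem.List.pyGetD emotion_index (i + 1) 0 - PySem.List.pyGetD emotion_index i 0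
        let diff2 := PySem.List.pyGetD emotion_index i 0 - PySem.List.pyGetD emotion_index (i - 1) 0
        if diff1 < 2 && diff2 < 2 then final_indexes ++ [PySem.List.pyGetD emotion_index i 0]
        else if diff2 < 2 then final_indexes ++ [PySem.List.pyGetD emotion_index i 0]
        else final_indexes
      else
        let diff2 := PySem.List.pyGetD emotion_index i 0 - PySem.List.pyGetD emotion_index (i - 1) 0
        if diff2 < 2 then final_indexes ++ [PySem.List.pyGetD emotion_index i 0]
        else final_indexes) []
  else emotion_index

-- ===== PORT B =====
-- one step of the run-building loop: extend the current run or close it and start a new one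
def runStep (s : List (List Int) × List Int) (x : Int) : List (List Int) × List Int :=
  if x - PySem.List.pyGetD s.2 (-1) 0 < 2 then (s.1, s.2 ++ [x]) else (s.1 ++ [s.2], [x])

def get_formatted_index_alt (emotion_index : List Int) : List Int :=
  if emotion_index.length ≤ 1 then emotion_index
  else
    match emotion_index with
    | [] => []
    | h :: t =>
      let st := t.foldl runStep ([], [h])
      let runs := st.1 ++ [st.2]
      let out0 := if 1 < (runs.headD []).length then runs.headD [] else []
      runs.tail.foldl (fun acc run => acc ++ run.tail) out0

-- ===== PRECONDITION & SPEC =====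
def Spec_get_formatted_index (emotion_index : List Int) (out : List Int) : Prop := out = get_formatted_index_alt emotion_index
instance (emotion_index : List Int) (out : List Int) : Decidable (Spec_get_formatted_index emotion_index out) := by unfold Spec_get_formatted_index; infer_instance

-- ===== CLAIM =====
def Claim_equal_get_formatted_index : Prop := ∀ (emotion_index : List Int), Dom_get_formatted_index emotion_index → Spec_get_formatted_index emotion_index (get_formatted_index emotion_index)

-- ===== LEMMAS AND PROOFS =====

-- common specification: keep x iff its gap to the previous element is < 2
def fkeep : Int → List Int → List Int
  | _, [] => []
  | prev, x :: xs => if x - prev < 2 then x :: fkeep x xs else fkeep x xs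

-- A's per-index keep condition, exactly A's branch structure
def pA (e : List Int) (i : Int) : Bool :=
  if i == 0 then decide (PySem.List.pyGetD e (i + 1) 0 - PySem.List.pyGetD e i 0 < 2)
  else if decide (i > 0) && decide (i < (e.length : Int) - 1) then
    (decide (PySem.List.pyGetD e (i + 1) 0 - PySem.List.pyGetD e i 0 < 2) &&
     decide (PySem.List.pyGetD e i 0 - PySem.List.pyGetD e (i - 1) 0 < 2)) ||
    decide (PySem.List.pyGetD e i 0 - PySem.List.pyGetD e (i - 1) 0 < 2)
  else decide (PySem.List.pyGetD e i 0 - PySem.List.pyGetD e (i - 1) 0 < 2)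

lemma body_eq (e : List Int) :
    (fun (final_indexes : List Int) (i : Int) =>
      if i == 0 then
        let diff := PySem.List.pyGetD e (i + 1) 0 - PySem.List.pyGetD e i 0
        if diff < 2 then final_indexes ++ [PySem.List.pyGetD e i 0] else final_indexes
      else if decide (i > 0) && decide (i < (e.length : Int) - 1) then
        let diff1 := PySem.List.pyGetD e (i + 1) 0 - PySem.List.pyGetD e i 0
        let diff2 := PySem.List.pyGetD e i 0 - PySem.List.pyGetD e (i - 1) 0
        if diff1 < 2 && diff2 < 2 then final_indexes ++ [PySem.List.pyGetD e i 0]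
        else if diff2 < 2 then final_indexes ++ [PySem.List.pyGetD e i 0]
        else final_indexes
      else
        let diff2 := PySem.List.pyGetD e i 0 - PySem.List.pyGetD e (i - 1) 0
        if diff2 < 2 then final_indexes ++ [PySem.List.pyGetD e i 0]
        else final_indexes)
    = (fun acc i => if pA e i then acc ++ [PySem.List.pyGetD e i 0] else acc) := by
  funext acc i
  simp only [pA]
  split_ifs with h1 h2 h3 h4 h5 h6 h7 h8 <;> first | rfl | (simp_all; try omega)

-- for 1 ≤ j A's condition is just "gap to the previous element < 2"
lemma pA_pos (e : List Int) (j : Int) (h0 : 1 ≤ j) :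
    pA e j = decide (PySem.List.pyGetD e j 0 - PySem.List.pyGetD e (j - 1) 0 < 2) := by
  simp only [pA, beq_iff_eq, if_neg (by omega : ¬ j = 0)]
  split_ifs with h
  · cases hd : decide (PySem.List.pyGetD e j 0 - PySem.List.pyGetD e (j - 1) 0 < 2) <;> simp
  · rfl

-- A's filtered index list from position k equals fkeep from e[k-1] over drop k
lemma A_suffix (e : List Int) : ∀ (m k : Nat), k + m = e.length → 1 ≤ k →
    ((PySem.List.pyRange (k : Int) (e.length : Int) 1).filter (pA e)).map
      (fun i => PySem.List.pyGetD e i 0)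
      = fkeep (PySem.List.pyGetD e ((k : Int) - 1) 0) (e.drop k) := by
  intro m
  induction m with
  | zero =>
    intro k hk _
    rw [PySem.List.pyRange_one_eq_nil (by omega)]
    rw [List.drop_of_length_le (by omega)]
    rfl
  | succ m ih =>
    intro k hk h1
    rw [PySem.List.pyRange_one_cons (by omega : (k:Int) < (e.length:Int))]
    have hkl : k < e.length := by omega
    have hd : e.drop k = e[k] :: e.drop (k+1) := by
      rw [List.drop_eq_getElem_cons hkl]
    have hget : PySem.List.pyGetD e (k : Int) 0 = e[k] := by
      have := PySem.List.pyGetD_eq_getElem e (i := (k : Int)) 0 (by positivity) (by exact_mod_cast hkl)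
      simpa using this
    have ihk := ih (k+1) (by omega) (by omega)
    push_cast at ihk
    rw [show (k:Int) + 1 - 1 = (k:Int) from by ring, hget] at ihk
    rw [List.filter_cons]
    rw [pA_pos e k (by exact_mod_cast h1)]
    rw [hd]
    simp only [fkeep]
    by_cases hc : e[k] - PySem.List.pyGetD e ((k:Int) - 1) 0 < 2
    · rw [if_pos (by rw [hget]; simpa using hc), List.map_cons, hget, if_pos hc, ihk]
    · rw [if_neg (by rw [hget]; simpa using hc), if_neg hc]
      exact ihk

-- A on h :: x :: xs equals the common spec
lemma A_spec (h x : Int) (xs : List Int) :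
    get_formatted_index (h :: x :: xs) = (if x - h < 2 then [h] else []) ++ fkeep h (x :: xs) := by
  unfold get_formatted_index
  rw [if_pos (by simp)]
  rw [body_eq, PySem.List.foldl_append_if, List.nil_append]
  have hr : PySem.List.pyRange 0 (((h :: x :: xs).length : Int)) 1
      = 0 :: PySem.List.pyRange 1 (((h :: x :: xs).length : Int)) 1 := by
    rw [PySem.List.pyRange_one_cons (by simp; omega)]
    norm_num
  rw [hr, List.filter_cons]
  have hp0 : pA (h :: x :: xs) 0 = decide (x - h < 2) := by
    simp [pA, PySem.List.pyGetD]
  have hg0 : PySem.List.pyGetD (h :: x :: xs) 0 0 = h := by simp [PySem.List.pyGetD]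
  have hsuf := A_suffix (h :: x :: xs) (xs.length + 1) 1 (by simp; omega) le_rfl
  simp only [Nat.cast_one, show (1:Int) - 1 = 0 from by norm_num, List.drop_succ_cons,
    List.drop_zero, hg0] at hsuf
  by_cases hc : x - h < 2
  · rw [hp0, if_pos (by simpa using hc), List.map_cons, hsuf, hg0, if_pos hc]
    rfl
  · rw [hp0, if_neg (by simpa using hc), hsuf, if_neg hc]
    rfl

-- ===== B side =====

-- the output B assembles from a run state
def fin (s : List (List Int) × List Int) : List Int :=
  let runs := s.1 ++ [s.2]
  (if 1 < (runs.headD []).length then runs.headD [] else []) ++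
    (runs.tail.flatMap List.tail)

lemma foldl_ext (l : List (List Int)) (init : List Int) :
    l.foldl (fun acc run => acc ++ run.tail) init = init ++ l.flatMap List.tail := by
  induction l generalizing init with
  | nil => simp
  | cons r rs ih => simp [List.foldl_cons, ih, List.flatMap_cons]

lemma plast_append (cur : List Int) (x : Int) :
    PySem.List.pyGetD (cur ++ [x]) (-1) 0 = x :=
  PySem.List.pyGetD_neg_one_append_singleton cur x 0

-- a "committed" state (first run closed, or current run already longer than 1) only
-- grows by the kept elements of the rest
lemma stable (rest : List Int) : ∀ (runs : List (List Int)) (cur : List Int),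
    cur ≠ [] → (runs ≠ [] ∨ 2 ≤ cur.length) →
    fin (rest.foldl runStep (runs, cur))
      = fin (runs, cur) ++ fkeep (PySem.List.pyGetD cur (-1) 0) rest := by
  induction rest with
  | nil => intro runs cur _ _; simp [fkeep]
  | cons x xs ih =>
    intro runs cur hne hcom
    rw [List.foldl_cons]
    simp only [fkeep]
    by_cases hc : x - PySem.List.pyGetD cur (-1) 0 < 2
    · have hstep : runStep (runs, cur) x = (runs, cur ++ [x]) := by
        simp [runStep, hc]
      rw [hstep, ih runs (cur ++ [x]) (by simp) (by right; have := List.length_pos_iff.mpr hne; simp; omega)]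
      rw [plast_append, if_pos hc]
      have hfin : fin (runs, cur ++ [x]) = fin (runs, cur) ++ [x] := by
        cases runs with
        | nil =>
          rcases hcom with hr | hl
          · exact absurd rfl hr
          · have h1 : 1 < (cur ++ [x]).length := by simp; omega
            have h2 : 1 < cur.length := by omega
            simp [fin, h2, hne]
        | cons r0 rr =>
          simp only [fin, List.cons_append, List.headD_cons, List.tail_cons]
          have htail : (cur ++ [x]).tail = cur.tail ++ [x] := by
            cases cur with
            | nil => exact absurd rfl hne
            | cons a as => simp
          rw [List.flatMap_append, List.flatMap_append]
          simp [htail]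
      rw [hfin]; simp
    · have hstep : runStep (runs, cur) x = (runs ++ [cur], [x]) := by
        simp [runStep, hc]
      rw [hstep, ih (runs ++ [cur]) [x] (by simp) (by left; simp)]
      rw [if_neg hc]
      have hlast : PySem.List.pyGetD [x] (-1) 0 = x := plast_append [] x
      rw [hlast]
      have hfin : fin (runs ++ [cur], [x]) = fin (runs, cur) := by
        cases runs with
        | nil =>
          rcases hcom with hr | hl
          · exact absurd rfl hr
          · have h2 : 1 < cur.length := by omega
            simp [fin, h2]
        | cons r0 rr =>
          simp only [fin, List.cons_append, List.headD_cons, List.tail_cons]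
          rw [List.flatMap_append, List.flatMap_append]
          simp
      rw [hfin]

-- B on h :: x :: xs equals the common spec
lemma B_spec (h x : Int) (xs : List Int) :
    get_formatted_index_alt (h :: x :: xs) = (if x - h < 2 then [h] else []) ++ fkeep h (x :: xs) := by
  unfold get_formatted_index_alt
  rw [if_neg (by simp)]
  simp only [List.foldl_cons]
  have hfin : ∀ s : List (List Int) × List Int,
      (s.1 ++ [s.2]).tail.foldl (fun acc run => acc ++ run.tail)
        (if 1 < ((s.1 ++ [s.2]).headD []).length then (s.1 ++ [s.2]).headD [] else []) = fin s := by
    intro s; rw [foldl_ext]; rfl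
  have hl1 : PySem.List.pyGetD [h] (-1) 0 = h := plast_append [] h
  by_cases hc : x - h < 2
  · have hstep : runStep ([], [h]) x = ([], [h, x]) := by
      simp [runStep, hl1, hc]
    rw [hstep, hfin, stable xs [] [h, x] (by simp) (by right; simp)]
    have hlx : PySem.List.pyGetD [h, x] (-1) 0 = x := plast_append [h] x
    rw [hlx, if_pos hc]
    have : fin ([], [h, x]) = [h, x] := by simp [fin]
    rw [this]
    simp only [fkeep]
    rw [if_pos hc]
    rfl
  · have hstep : runStep ([], [h]) x = ([[h]], [x]) := by
      simp [runStep, hl1, hc]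
    rw [hstep, hfin, stable xs [[h]] [x] (by simp) (by left; simp)]
    have hlx : PySem.List.pyGetD [x] (-1) 0 = x := plast_append [] x
    rw [hlx, if_neg hc]
    have : fin ([[h]], [x]) = [] := by simp [fin]
    rw [this]
    simp only [fkeep]
    rw [if_neg hc]

lemma main_eq (e : List Int) : get_formatted_index e = get_formatted_index_alt e := by
  match e with
  | [] => rfl
  | [a] => rfl
  | h :: x :: xs => rw [A_spec, B_spec]

-- ===== VERDICT =====
theorem get_formatted_index_spec : Claim_equal_get_formatted_index := by
  intro e _
  unfold Spec_get_formatted_index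
  exact main_eq e
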